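-- pv_equiv track=rewrite | github.com/Tsadoq/check_chatbot | ingestion/parsers/integration_ingestion.py | parse_integration_metadata
-- ===== SOURCE A (Python) =====
-- from typing import Dict
--
-- def parse_integration_metadata(content: str) -> Dict[str, str]:
--     """
--     Parse metadata (title, author, date) and content from blogpost text.
--     :param content: str, the content of the blogpost.
--     :return: dict, a dictionary containing the metadata and content of the blogpost.
--     """
--     metadata = {}
--     lines = content.splitlines()
--     content_start_idx = 0
--
--     for idx, line in enumerate(lines):
--         if line.startswith('>>>>PROVIDER>>>>'):
--             metadata['provider'] = line.replace('>>>>PROVIDER>>>>', '').strip()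
--         elif line.startswith('>>>>INTEGRATION_NAME>>>>'):
--             metadata['Name'] = line.replace('>>>>INTEGRATION_NAME>>>>', '').strip()
--         elif line.startswith('>>>>LICENSE>>>>'):
--             metadata['license'] = line.replace('>>>>LICENSE>>>>', '').strip()
--             content_start_idx = idx + 1
--             break
--
--     metadata['content'] = '\n'.join(lines[content_start_idx:]).strip()
--
--     return metadata
-- ===== SOURCE B (Python) =====
-- def parse_integration_metadata(content: str):
--     """
--     Index-first decomposition: locate the first LICENSE line, split the text
--     into header/content regions, then scan only the header for provider/Name.
--     """
--     lines = content.splitlines()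
--     hit = next(((i, line) for i, line in enumerate(lines)
--                 if line.startswith('>>>>LICENSE>>>>')), None)
--     metadata = {}
--     if hit is None:
--         header, body = lines, lines
--     else:
--         i, lic_line = hit
--         header, body = lines[:i], lines[i + 1:]
--     for line in header:
--         if line.startswith('>>>>PROVIDER>>>>'):
--             metadata['provider'] = line.replace('>>>>PROVIDER>>>>', '').strip()
--         elif line.startswith('>>>>INTEGRATION_NAME>>>>'):
--             metadata['Name'] = line.replace('>>>>INTEGRATION_NAME>>>>', '').strip()
--     if hit is not None:
--         metadata['license'] = lic_line.replace('>>>>LICENSE>>>>', '').strip()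
--     metadata['content'] = '\n'.join(body).strip()
--     return metadata
-- ===== Notes on version B (the rewrite author's own statement) =====
-- stated objective: alternative
-- what changed: Replaces A's single stateful loop with break by an index-first decomposition: find the first LICENSE line, split the lines into header and content regions, then scan only the header for provider/Name markers.
import Mathlib
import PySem

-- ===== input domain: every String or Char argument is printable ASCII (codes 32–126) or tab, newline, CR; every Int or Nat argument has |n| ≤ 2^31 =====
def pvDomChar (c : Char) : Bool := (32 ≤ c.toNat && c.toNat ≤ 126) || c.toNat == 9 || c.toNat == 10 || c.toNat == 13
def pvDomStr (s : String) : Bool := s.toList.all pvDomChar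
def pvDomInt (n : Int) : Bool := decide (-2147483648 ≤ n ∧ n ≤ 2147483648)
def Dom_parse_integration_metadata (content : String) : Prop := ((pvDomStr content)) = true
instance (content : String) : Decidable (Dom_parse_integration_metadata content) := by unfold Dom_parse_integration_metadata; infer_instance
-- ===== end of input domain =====

-- B replaces A's single stateful loop-with-break by an index-first decomposition
-- (find the first LICENSE line, split into header/content regions, scan only the
-- header); same cost, alternative structure.


-- ===== PORT A =====
-- A's for-loop with break: carries the metadata dict and the absolute index;
-- returns (metadata, content_start_idx), content_start_idx = 0 if no break.
def pvLoopA (lines : List String) (idx : Nat) (md : PySem.Dict String String) :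
    PySem.Dict String String × Nat :=
  match lines with
  | [] => (md, 0)
  | line :: rest =>
    if PySem.Str.startswith line ">>>>PROVIDER>>>>" then
      pvLoopA rest (idx + 1)
        (md.insert "provider" (PySem.Str.strip (PySem.Str.replace line ">>>>PROVIDER>>>>" "")))
    else if PySem.Str.startswith line ">>>>INTEGRATION_NAME>>>>" then
      pvLoopA rest (idx + 1)
        (md.insert "Name" (PySem.Str.strip (PySem.Str.replace line ">>>>INTEGRATION_NAME>>>>" "")))
    else if PySem.Str.startswith line ">>>>LICENSE>>>>" then
      (md.insert "license" (PySem.Str.strip (PySem.Str.replace line ">>>>LICENSE>>>>" "")), idx + 1)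
    else
      pvLoopA rest (idx + 1) md

def parse_integration_metadata (content : String) : List (String × String) :=
  let lines := PySem.Str.splitlines content
  let r := pvLoopA lines 0 PySem.Dict.empty
  ((r.1).insert "content"
      (PySem.Str.strip (PySem.Str.join "\n" (PySem.List.slice lines (some (r.2 : Int)) none)))).items

-- ===== PORT B =====
-- next(((i, line) for i, line in enumerate(lines) if line.startswith('>>>>LICENSE>>>>')), None)
def pvFindLic : List String → Option (Nat × String)
  | [] => none
  | l :: rest =>
    if PySem.Str.startswith l ">>>>LICENSE>>>>" then some (0, l)
    else (pvFindLic rest).map (fun p => (p.1 + 1, p.2))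

-- the header pass: provider / Name assignments only
def pvScanHeader : List String → PySem.Dict String String → PySem.Dict String String
  | [], md => md
  | l :: rest, md =>
    if PySem.Str.startswith l ">>>>PROVIDER>>>>" then
      pvScanHeader rest
        (md.insert "provider" (PySem.Str.strip (PySem.Str.replace l ">>>>PROVIDER>>>>" "")))
    else if PySem.Str.startswith l ">>>>INTEGRATION_NAME>>>>" then
      pvScanHeader rest
        (md.insert "Name" (PySem.Str.strip (PySem.Str.replace l ">>>>INTEGRATION_NAME>>>>" "")))
    else
      pvScanHeader rest md

def parse_integration_metadata_alt (content : String) : List (String × String) :=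
  let lines := PySem.Str.splitlines content
  match pvFindLic lines with
  | none =>
      ((pvScanHeader lines PySem.Dict.empty).insert "content"
          (PySem.Str.strip (PySem.Str.join "\n" lines))).items
  | some (i, licLine) =>
      ((((pvScanHeader (lines.take i) PySem.Dict.empty).insert "license"
            (PySem.Str.strip (PySem.Str.replace licLine ">>>>LICENSE>>>>" ""))).insert "content"
          (PySem.Str.strip (PySem.Str.join "\n" (lines.drop (i + 1)))))).items

-- ===== PRECONDITION & SPEC =====
def Spec_parse_integration_metadata (content : String) (out : List (String × String)) : Prop := out = parse_integration_metadata_alt content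
instance (content : String) (out : List (String × String)) : Decidable (Spec_parse_integration_metadata content out) := by unfold Spec_parse_integration_metadata; infer_instance

-- ===== CLAIM (what is proved, stated in full; the proofs are below) =====
def Claim_equal_parse_integration_metadata : Prop := ∀ (content : String), Dom_parse_integration_metadata content → Spec_parse_integration_metadata content (parse_integration_metadata content)

-- ===== LEMMAS AND PROOFS =====

-- the three markers are pairwise non-prefixes, so a line starts with at most one of them
theorem not_lic_of_other (s p : String)
    (hp : ¬ (">>>>LICENSE>>>>".toList <+: p.toList) ∧ ¬ (p.toList <+: ">>>>LICENSE>>>>".toList))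
    (h : PySem.Str.startswith s p = true) :
    PySem.Str.startswith s ">>>>LICENSE>>>>" = false := by
  by_contra hL
  rw [Bool.not_eq_false] at hL
  simp only [PySem.Str.startswith_eq, PySem.Chars.startswith_iff] at h hL
  rcases List.prefix_or_prefix_of_prefix hL h with h1 | h1
  · exact hp.1 h1
  · exact hp.2 h1

theorem loopA_eq_find (lines : List String) (k : Nat) (md : PySem.Dict String String) :
    pvLoopA lines k md =
      match pvFindLic lines with
      | none => (pvScanHeader lines md, 0)
      | some (i, l) =>
          ((pvScanHeader (lines.take i) md).insert "license"
              (PySem.Str.strip (PySem.Str.replace l ">>>>LICENSE>>>>" "")), k + i + 1) := by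
  induction lines generalizing k md with
  | nil => simp [pvLoopA, pvFindLic, pvScanHeader]
  | cons line rest ih =>
    by_cases hP : PySem.Str.startswith line ">>>>PROVIDER>>>>" = true
    · have hL := not_lic_of_other line ">>>>PROVIDER>>>>" (by decide) hP
      simp at hP hL
      cases hf : pvFindLic rest with
      | none => simp [pvLoopA, pvFindLic, pvScanHeader, hP, hL, hf, ih]
      | some p =>
        rcases p with ⟨i, l⟩
        simp [pvLoopA, pvFindLic, pvScanHeader, hP, hL, hf, ih, Prod.mk.injEq,
          List.take_succ_cons]
        omega
    · by_cases hN : PySem.Str.startswith line ">>>>INTEGRATION_NAME>>>>" = true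
      · have hL := not_lic_of_other line ">>>>INTEGRATION_NAME>>>>" (by decide) hN
        simp at hP hN hL
        cases hf : pvFindLic rest with
        | none => simp [pvLoopA, pvFindLic, pvScanHeader, hP, hN, hL, hf, ih]
        | some p =>
          rcases p with ⟨i, l⟩
          simp [pvLoopA, pvFindLic, pvScanHeader, hP, hN, hL, hf, ih, Prod.mk.injEq,
            List.take_succ_cons]
          omega
      · by_cases hL : PySem.Str.startswith line ">>>>LICENSE>>>>" = true
        · simp at hP hN hL
          simp [pvLoopA, pvFindLic, pvScanHeader, hP, hN, hL]
        · simp at hP hN hL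
          cases hf : pvFindLic rest with
          | none => simp [pvLoopA, pvFindLic, pvScanHeader, hP, hN, hL, hf, ih]
          | some p =>
            rcases p with ⟨i, l⟩
            simp [pvLoopA, pvFindLic, pvScanHeader, hP, hN, hL, hf, ih, Prod.mk.injEq,
              List.take_succ_cons]
            omega

-- ===== VERDICT (by name: the statement is the Claim_ definition above) =====
theorem parse_integration_metadata_spec : Claim_equal_parse_integration_metadata := by
  intro content _
  unfold Spec_parse_integration_metadata
  simp only [parse_integration_metadata, parse_integration_metadata_alt]
  rw [loopA_eq_find]
  cases hf : pvFindLic (PySem.Str.splitlines content) with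
  | none =>
    simp
  | some p =>
    rcases p with ⟨i, l⟩
    have h1 : ((0 + i + 1 : Nat) : Int) = ((i + 1 : Nat) : Int) := by omega
    simp only [h1, PySem.List.slice_from_natCast]
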